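-- pv_equiv track=rewrite | github.com/ishu59/MSDDRuleLatest | src/MSDD.py | get_row_combination
-- ===== SOURCE A (Python) =====
-- from typing import List, Dict, Tuple
--
-- WILDCARD = '*'
--
-- def get_row_combination(data:List[str])->List[List[str]]:
--     if len(data) == 1:
--         return [[data[0]],[ WILDCARD]]
--     curr_list = get_row_combination(data[1:])
--     result_list = []
--     for index in range(len(curr_list)):
--         a =  [[data[0]]+curr_list[index]]
--         b = [[WILDCARD] + curr_list[index]]
--         result_list.extend(a)
--         result_list.extend(b)
--     # result_tuple = tuple(tuple(x) for x in result_list)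
--     return result_list
-- ===== SOURCE B (Python) =====
-- WILDCARD = '*'
--
-- def get_row_combination(data):
--     n = len(data)
--     return [[WILDCARD if (i >> j) & 1 else data[j] for j in range(n)]
--             for i in range(2 ** n)]
-- ===== Notes on version B (the rewrite author's own statement) =====
-- stated objective: idiomatic
-- what changed: Replaced the suffix-recursion that interleaves value/wildcard pairs with a closed-form bitmask enumeration: row i takes WILDCARD at position j iff bit j of i is set, which reproduces A's ordering exactly.
import Mathlib
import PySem

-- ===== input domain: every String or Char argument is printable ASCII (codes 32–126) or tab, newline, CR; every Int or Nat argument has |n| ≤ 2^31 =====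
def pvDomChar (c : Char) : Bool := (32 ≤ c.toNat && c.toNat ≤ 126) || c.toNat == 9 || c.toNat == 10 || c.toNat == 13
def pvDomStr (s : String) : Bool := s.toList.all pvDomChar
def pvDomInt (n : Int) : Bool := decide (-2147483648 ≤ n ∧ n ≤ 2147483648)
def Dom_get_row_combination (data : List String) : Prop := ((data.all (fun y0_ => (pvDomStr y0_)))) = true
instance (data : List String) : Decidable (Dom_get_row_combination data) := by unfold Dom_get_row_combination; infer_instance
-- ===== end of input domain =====

-- B replaces A's suffix-recursion with a closed-form bitmask enumeration (same order, same cost; objective: idiomatic).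

-- ===== PORT A =====
-- A's recursion: len==1 base case, else prefix each recursive row with the value then the wildcard.
-- Python A never returns on []: it recurses on data[1:] = [] forever (RecursionError);
-- the [] branch below is unreachable under Pre_.
def get_row_combination : List String → List (List String)
  | [] => []
  | [d] => [[d], ["*"]]
  | d :: rest@(_ :: _) =>
      let curr_list := get_row_combination rest
      curr_list.foldl (fun acc c => (acc ++ [d :: c]) ++ ["*" :: c]) []

-- ===== PORT B =====
-- Source B: row i of 2^n has WILDCARD at position j iff (i >> j) & 1, i.e. Nat.testBit i j.
def get_row_combination_alt (data : List String) : List (List String) :=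
  let n := data.length
  (List.range (2 ^ n)).map (fun i =>
    (List.range n).map (fun j => if Nat.testBit i j then "*" else data.getD j ""))

-- ===== PRECONDITION & SPEC =====
-- Pre_ excludes only the empty list, on which Python A raises RecursionError.
def Pre_get_row_combination (data : List String) : Prop := data ≠ []
instance (data : List String) : Decidable (Pre_get_row_combination data) := by unfold Pre_get_row_combination; infer_instance
def pvWitness_get_row_combination : List String := ["a", "b"]

def Spec_get_row_combination (data : List String) (out : List (List String)) : Prop := out = get_row_combination_alt data
instance (data : List String) (out : List (List String)) : Decidable (Spec_get_row_combination data out) := by unfold Spec_get_row_combination; infer_instance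

-- ===== CLAIM (what is proved, stated in full; the proofs are below) =====
def Claim_equal_get_row_combination : Prop := ∀ (data : List String), Dom_get_row_combination data → Pre_get_row_combination data → Spec_get_row_combination data (get_row_combination data)

-- ===== LEMMAS AND PROOFS =====

theorem e3 (k j : Nat) : Nat.testBit (2*k) (j+1) = Nat.testBit k j := by
  rw [Nat.testBit_succ]; congr 1; omega

theorem e4 (k j : Nat) : Nat.testBit (2*k+1) (j+1) = Nat.testBit k j := by
  rw [Nat.testBit_succ]; congr 1; omega

-- enumerating range (2*N) is enumerating its even/odd index pairs in order
theorem range_two_mul_map {α : Type} (g : Nat → α) (N : Nat) :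
    (List.range (2 * N)).map g = (List.range N).flatMap (fun k => [g (2 * k), g (2 * k + 1)]) := by
  induction N with
  | zero => simp
  | succ m ih =>
      have h2 : 2 * (m + 1) = (2 * m + 1) + 1 := by ring
      rw [h2, List.range_succ, List.range_succ, List.range_succ]
      simp [ih]

theorem row_even (d : String) (rest : List String) (k : Nat) :
    (List.range (rest.length + 1)).map
        (fun j => if Nat.testBit (2*k) j then "*" else (d :: rest).getD j "")
      = d :: (List.range rest.length).map
        (fun j => if Nat.testBit k j then "*" else rest.getD j "") := by
  rw [List.range_succ_eq_map]
  simp [e3, Function.comp]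

theorem row_odd (d : String) (rest : List String) (k : Nat) :
    (List.range (rest.length + 1)).map
        (fun j => if Nat.testBit (2*k+1) j then "*" else (d :: rest).getD j "")
      = "*" :: (List.range rest.length).map
        (fun j => if Nat.testBit k j then "*" else rest.getD j "") := by
  rw [List.range_succ_eq_map]
  simp [e4, Function.comp]

theorem main_eq : ∀ (data : List String), data ≠ [] →
    get_row_combination data = get_row_combination_alt data := by
  intro data
  induction data with
  | nil => intro h; exact absurd rfl h
  | cons d rest ih =>
      intro _
      cases rest with
      | nil =>
          simp [get_row_combination, get_row_combination_alt, List.range_succ]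
      | cons e tl =>
          have hrec : get_row_combination (d :: e :: tl)
              = (get_row_combination (e :: tl)).foldl
                  (fun acc c => (acc ++ [d :: c]) ++ ["*" :: c]) [] := by
            simp [get_row_combination]
          rw [hrec, ih (by simp)]
          have hfold : ∀ (l : List (List String)),
              l.foldl (fun acc c => (acc ++ [d :: c]) ++ ["*" :: c]) []
                = l.flatMap (fun c => [d :: c, "*" :: c]) := by
            intro l
            have h := PySem.List.foldl_append_eq_flatMap
              (l := l) (acc := ([] : List (List String)))
              (g := fun c => [d :: c, "*" :: c])
            simp only [List.nil_append] at h
            rw [← h]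
            simp
          rw [hfold]
          unfold get_row_combination_alt
          simp only [List.length_cons, List.flatMap_map]
          rw [show (2:Nat) ^ (tl.length + 1 + 1) = 2 * 2 ^ (tl.length + 1) by ring,
            range_two_mul_map]
          apply List.flatMap_congr
          intro k _
          have he := row_even d (e :: tl) k
          have ho := row_odd d (e :: tl) k
          simp only [List.length_cons] at he ho
          rw [he, ho]

-- ===== VERDICT (by name: the statement is the Claim_ definition above) =====
theorem get_row_combination_spec : Claim_equal_get_row_combination := by
  intro data _ hp
  unfold Spec_get_row_combination
  exact main_eq data hp
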